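-- pv_equiv track=rewrite | github.com/amanimran786/jarvis-ai | meeting_listener.py | _extract_latest_caption_line
-- ===== SOURCE A (Python) =====
-- def _extract_latest_caption_line(text: str) -> str:
--     lines = []
--     for raw in (text or "").splitlines():
--         line = raw.strip()
--         if not line:
--             continue
--         if line.startswith("Recent ") or line.startswith("Couldn't "):
--             continue
--         if line.startswith("- "):
--             line = line[2:].strip()
--         if line:
--             lines.append(line)
--     return lines[-1] if lines else ""
-- ===== SOURCE B (Python) =====
-- def _extract_latest_caption_line(text: str) -> str:
--     for raw in reversed((text or "").splitlines()):
--         line = raw.strip()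
--         if not line:
--             continue
--         if line.startswith("Recent ") or line.startswith("Couldn't "):
--             continue
--         if line.startswith("- "):
--             line = line[2:].strip()
--             if not line:
--                 continue
--         return line
--     return ""
-- ===== Notes on version B (the rewrite author's own statement) =====
-- stated objective: simpler
-- what changed: Scans the lines back-to-front and returns the first line that survives the filtering, instead of building the full list of surviving lines and taking its last element.
import Mathlib
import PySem

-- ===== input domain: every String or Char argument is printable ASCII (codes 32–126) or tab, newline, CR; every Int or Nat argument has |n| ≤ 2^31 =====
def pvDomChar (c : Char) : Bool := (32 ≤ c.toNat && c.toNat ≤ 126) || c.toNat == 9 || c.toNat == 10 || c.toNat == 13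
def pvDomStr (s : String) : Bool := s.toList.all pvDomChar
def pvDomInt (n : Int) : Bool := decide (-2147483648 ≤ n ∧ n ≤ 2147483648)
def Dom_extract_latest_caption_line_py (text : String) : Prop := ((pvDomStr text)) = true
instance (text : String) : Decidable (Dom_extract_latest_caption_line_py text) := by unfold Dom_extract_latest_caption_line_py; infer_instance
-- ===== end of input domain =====

-- B scans the lines back-to-front and returns the first survivor of the filtering,
-- instead of building the full list of surviving lines and taking its last element (objective: simpler).

-- ===== PORT A =====
def extract_latest_caption_line_py (text : String) : String :=
  let lines := (PySem.Str.splitlines (if text == "" then "" else text)).foldl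
    (fun lines raw =>
      let line := PySem.Str.strip raw
      if line == "" then lines
      else if PySem.Str.startswith line "Recent " || PySem.Str.startswith line "Couldn't " then lines
      else
        let line := if PySem.Str.startswith line "- " then PySem.Str.strip (PySem.Str.slice line (some 2) none) else line
        if line == "" then lines else lines ++ [line]) []
  if lines == [] then "" else PySem.List.pyGetD lines (-1) ""

-- ===== PORT B =====
def pvScanRev : List String → String
  | [] => ""
  | raw :: rest =>
    let line := PySem.Str.strip raw
    if line == "" then pvScanRev rest
    else if PySem.Str.startswith line "Recent " || PySem.Str.startswith line "Couldn't " then pvScanRev rest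
    else if PySem.Str.startswith line "- " then
      let line2 := PySem.Str.strip (PySem.Str.slice line (some 2) none)
      if line2 == "" then pvScanRev rest else line2
    else line

def extract_latest_caption_line_py_alt (text : String) : String :=
  pvScanRev (PySem.Str.splitlines (if text == "" then "" else text)).reverse

-- ===== PRECONDITION & SPEC =====
def Spec_extract_latest_caption_line_py (text : String) (out : String) : Prop := out = extract_latest_caption_line_py_alt text
instance (text : String) (out : String) : Decidable (Spec_extract_latest_caption_line_py text out) := by unfold Spec_extract_latest_caption_line_py; infer_instance

-- ===== CLAIM (what is proved, stated in full; the proofs are below) =====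
def Claim_equal_extract_latest_caption_line_py : Prop := ∀ (text : String), Dom_extract_latest_caption_line_py text → Spec_extract_latest_caption_line_py text (extract_latest_caption_line_py text)

-- ===== LEMMAS AND PROOFS =====

-- the line-transform both programs apply, as a partial map
def pvKeep (raw : String) : Option String :=
  let line := PySem.Str.strip raw
  if line == "" then none
  else if PySem.Str.startswith line "Recent " || PySem.Str.startswith line "Couldn't " then none
  else
    let line := if PySem.Str.startswith line "- " then PySem.Str.strip (PySem.Str.slice line (some 2) none) else line
    if line == "" then none else some line

theorem pv_foldl_eq_filterMap (ls : List String) (acc : List String) :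
    ls.foldl
      (fun lines raw =>
        let line := PySem.Str.strip raw
        if line == "" then lines
        else if PySem.Str.startswith line "Recent " || PySem.Str.startswith line "Couldn't " then lines
        else
          let line := if PySem.Str.startswith line "- " then PySem.Str.strip (PySem.Str.slice line (some 2) none) else line
          if line == "" then lines else lines ++ [line]) acc
    = acc ++ ls.filterMap pvKeep := by
  induction ls generalizing acc with
  | nil => simp
  | cons raw rest ih =>
      simp only [List.foldl_cons, List.filterMap_cons, ih, pvKeep]
      split_ifs <;> simp

theorem pvScanRev_cons (raw : String) (rest : List String) :
    pvScanRev (raw :: rest) = (pvKeep raw).getD (pvScanRev rest) := by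
  simp only [pvScanRev, pvKeep]
  split_ifs <;> rfl

theorem pvScanRev_eq (ls : List String) : pvScanRev ls = ((ls.filterMap pvKeep).headD "") := by
  induction ls with
  | nil => rfl
  | cons raw rest ih =>
      rw [pvScanRev_cons, List.filterMap_cons]
      cases h : pvKeep raw <;> simp [ih]

-- ===== VERDICT (by name: the statement is the Claim_ definition above) =====
theorem extract_latest_caption_line_py_spec : Claim_equal_extract_latest_caption_line_py := by
  intro text _
  unfold Spec_extract_latest_caption_line_py extract_latest_caption_line_py extract_latest_caption_line_py_alt
  rw [pv_foldl_eq_filterMap, pvScanRev_eq]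
  simp only [List.nil_append, List.filterMap_reverse]
  rcases h : (PySem.Str.splitlines (if text == "" then "" else text)).filterMap pvKeep with _ | ⟨x, xs⟩
  · simp
  · rw [if_neg (by simp)]
    rw [PySem.List.pyGetD_neg_one _ _ (List.cons_ne_nil x xs)]
    simp only [List.headD_eq_head?_getD, List.head?_reverse]
    rw [List.getLast?_eq_some_getLast (List.cons_ne_nil x xs)]
    rfl
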